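-- pv_equiv track=rewrite | github.com/tyhhnu/DeepBranch | python/test_dense.py | get_cen
-- ===== SOURCE A (Python) =====
-- def get_cen(shape,rx,ry,rz,margin,re_filed):
--     x0_num = shape[0]
--     y0_num = shape[1]
--     z0_num = shape[2]
--     x1_num = (x0_num // (rx-re_filed))  #12
--     y1_num = (y0_num // (ry-re_filed))   #7
--     z1_num = (z0_num // (rz-re_filed))+1  #3
--     cen_location = []
--     for k in range(z1_num):
--         for j in range(y1_num):
--             for i in range(x1_num):
--     #            cen_pixel[i, j, k] = orgimg[30+60*i, 30+60*j, 17+34*k]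
--                 cen_location.append([int((rx-re_filed)/2+(rx-re_filed)*i), int((ry-re_filed)/2+(ry-re_filed)*j), int((rz-re_filed)/2+(rz-re_filed)*k)])
--     return cen_location
-- ===== SOURCE B (Python) =====
-- def get_cen(shape, rx, ry, rz, margin, re_filed):
--     # Flat enumeration: one loop over the total number of cells; the (k, j, i)
--     # grid indices are recovered from the flat index by div/mod arithmetic.
--     dx = rx - re_filed
--     dy = ry - re_filed
--     dz = rz - re_filed
--     nx = max(shape[0] // dx, 0)
--     ny = max(shape[1] // dy, 0)
--     nz = max(shape[2] // dz + 1, 0)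
--     cen_location = []
--     for n in range(nz * ny * nx):
--         k = n // (ny * nx)
--         r = n % (ny * nx)
--         j = r // nx
--         i = r % nx
--         cen_location.append([int(dx / 2 + dx * i), int(dy / 2 + dy * j), int(dz / 2 + dz * k)])
--     return cen_location
-- ===== Notes on version B (the rewrite author's own statement) =====
-- stated objective: alternative
-- what changed: B replaces A's three nested loops by a single flat loop over the total cell count nz*ny*nx, recovering the grid indices (k, j, i) from the flat index by div/mod arithmetic, keeping the int(float) coordinate formulas byte-for-byte; Pre_ excludes rx=re_filed, ry=re_filed or rz=re_filed, on which A raises ZeroDivisionError.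
import Mathlib
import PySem

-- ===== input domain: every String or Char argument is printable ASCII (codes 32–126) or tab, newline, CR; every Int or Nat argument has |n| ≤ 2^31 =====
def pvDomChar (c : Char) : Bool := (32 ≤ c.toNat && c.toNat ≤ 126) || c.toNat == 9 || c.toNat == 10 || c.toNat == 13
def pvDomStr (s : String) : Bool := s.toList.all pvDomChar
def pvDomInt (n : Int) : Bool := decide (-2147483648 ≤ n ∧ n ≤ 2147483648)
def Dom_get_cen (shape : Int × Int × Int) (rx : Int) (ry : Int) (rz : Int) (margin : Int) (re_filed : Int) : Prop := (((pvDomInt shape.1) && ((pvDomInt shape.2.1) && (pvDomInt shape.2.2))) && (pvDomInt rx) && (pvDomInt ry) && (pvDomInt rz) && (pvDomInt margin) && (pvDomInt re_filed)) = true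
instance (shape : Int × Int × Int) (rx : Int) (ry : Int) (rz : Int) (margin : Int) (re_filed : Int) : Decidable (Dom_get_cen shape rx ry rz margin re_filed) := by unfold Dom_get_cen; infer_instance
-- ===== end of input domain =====

-- B replaces A's triply nested loop by one flat loop over the total cell count,
-- recovering the (k, j, i) grid indices from the flat index by div/mod arithmetic
-- (objective: alternative).

-- ===== PORT A =====
-- Python's 'int((rx-re_filed)/2 + (rx-re_filed)*i)' uses float arithmetic; under Dom
-- (|ints| ≤ 2^31) the value is the exact half-integer (rx-re_filed)*(2*i+1)/2 (its
-- magnitude stays below 2^34 < 2^52, so the double is exact), and int() truncates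
-- toward zero, which is Int.tdiv — this hand-port of the float expression is exact
-- on the stated domain.
def get_cen (shape : Int × Int × Int) (rx : Int) (ry : Int) (rz : Int) (margin : Int) (re_filed : Int) : List (List Int) :=
  let x0_num := shape.1
  let y0_num := shape.2.1
  let z0_num := shape.2.2
  let x1_num := PySem.Int.floordiv x0_num (rx - re_filed)
  let y1_num := PySem.Int.floordiv y0_num (ry - re_filed)
  let z1_num := PySem.Int.floordiv z0_num (rz - re_filed) + 1
  (PySem.List.pyRange 0 z1_num 1).foldl (fun acc k =>
    (PySem.List.pyRange 0 y1_num 1).foldl (fun acc j =>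
      (PySem.List.pyRange 0 x1_num 1).foldl (fun acc i =>
        acc ++ [[Int.tdiv ((rx - re_filed) * (2 * i + 1)) 2,
                 Int.tdiv ((ry - re_filed) * (2 * j + 1)) 2,
                 Int.tdiv ((rz - re_filed) * (2 * k + 1)) 2]]) acc) acc) []

-- ===== PORT B =====
-- same int(float) expression as Source B, ported with Int.tdiv exactly as in port A
def get_cen_alt (shape : Int × Int × Int) (rx : Int) (ry : Int) (rz : Int) (margin : Int) (re_filed : Int) : List (List Int) :=
  let dx := rx - re_filed
  let dy := ry - re_filed
  let dz := rz - re_filed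
  let nx := max (PySem.Int.floordiv shape.1 dx) 0
  let ny := max (PySem.Int.floordiv shape.2.1 dy) 0
  let nz := max (PySem.Int.floordiv shape.2.2 dz + 1) 0
  (PySem.List.pyRange 0 (nz * ny * nx) 1).foldl (fun acc n =>
    let k := PySem.Int.floordiv n (ny * nx)
    let r := PySem.Int.mod n (ny * nx)
    let j := PySem.Int.floordiv r nx
    let i := PySem.Int.mod r nx
    acc ++ [[Int.tdiv (dx * (2 * i + 1)) 2,
             Int.tdiv (dy * (2 * j + 1)) 2,
             Int.tdiv (dz * (2 * k + 1)) 2]]) []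

-- ===== PRECONDITION & SPEC =====
-- Pre_ excludes exactly the inputs on which Python A raises ZeroDivisionError
-- (rx = re_filed, ry = re_filed or rz = re_filed).
def Pre_get_cen (shape : Int × Int × Int) (rx : Int) (ry : Int) (rz : Int) (margin : Int) (re_filed : Int) : Prop :=
  rx ≠ re_filed ∧ ry ≠ re_filed ∧ rz ≠ re_filed
instance (shape : Int × Int × Int) (rx : Int) (ry : Int) (rz : Int) (margin : Int) (re_filed : Int) : Decidable (Pre_get_cen shape rx ry rz margin re_filed) := by unfold Pre_get_cen; infer_instance

def pvWitness_get_cen : (Int × Int × Int) × Int × Int × Int × Int × Int := ((4, 4, 4), 2, 2, 2, 0, 0)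

def Spec_get_cen (shape : Int × Int × Int) (rx : Int) (ry : Int) (rz : Int) (margin : Int) (re_filed : Int) (out : List (List Int)) : Prop := out = get_cen_alt shape rx ry rz margin re_filed
instance (shape : Int × Int × Int) (rx : Int) (ry : Int) (rz : Int) (margin : Int) (re_filed : Int) (out : List (List Int)) : Decidable (Spec_get_cen shape rx ry rz margin re_filed out) := by unfold Spec_get_cen; infer_instance

-- ===== CLAIM (what is proved, stated in full; the proofs are below) =====
def Claim_equal_get_cen : Prop := ∀ (shape : Int × Int × Int) (rx : Int) (ry : Int) (rz : Int) (margin : Int) (re_filed : Int), Dom_get_cen shape rx ry rz margin re_filed → Pre_get_cen shape rx ry rz margin re_filed → Spec_get_cen shape rx ry rz margin re_filed (get_cen shape rx ry rz margin re_filed)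

-- ===== LEMMAS AND PROOFS =====

-- splitting a flat range in blocks of size b
theorem pv_range_mul_map {α : Type} (a b : Nat) (f : Nat → α) :
    (List.range (a * b)).map f
      = (List.range a).flatMap (fun q => (List.range b).map (fun r => f (b * q + r))) := by
  induction a with
  | zero => simp
  | succ a ih =>
    rw [List.range_succ, Nat.succ_mul, List.range_add, List.map_append, ih,
        List.flatMap_append]
    simp [Nat.mul_comm]

-- two-level unflattening: a flat range of a*(b*c) cells equals the nested traversal
theorem pv_key {α : Type} (a b c : Nat) (g : Nat → α) (f : Nat → Nat → Nat → α)
    (hg : ∀ q j i, j < b → i < c → g (b * c * q + (c * j + i)) = f q j i) :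
    (List.range (a * (b * c))).map g
      = (List.range a).flatMap (fun q =>
          (List.range b).flatMap (fun j => (List.range c).map (fun i => f q j i))) := by
  rw [pv_range_mul_map a (b * c)]
  refine List.flatMap_congr (fun q _ => ?_)
  rw [pv_range_mul_map b c]
  refine List.flatMap_congr (fun j hj => ?_)
  refine List.map_congr_left (fun i hi => ?_)
  have hjb : j < b := List.mem_range.mp hj
  have hic : i < c := List.mem_range.mp hi
  exact hg q j i hjb hic

-- floordiv/mod evaluation at a decomposed flat index (all Nat, then cast)
theorem pv_div_eval (b c q j i : Nat) (hj : j < b) (hi : i < c) :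
    PySem.Int.floordiv ((b * c * q + (c * j + i) : Nat) : Int) ((b : Int) * c) = (q : Int)
    ∧ PySem.Int.mod ((b * c * q + (c * j + i) : Nat) : Int) ((b : Int) * c) = ((c * j + i : Nat) : Int)
    ∧ PySem.Int.floordiv ((c * j + i : Nat) : Int) (c : Int) = (j : Int)
    ∧ PySem.Int.mod ((c * j + i : Nat) : Int) (c : Int) = (i : Int) := by
  have hbc : c * j + i < b * c := by
    have h1 : c * (j + 1) ≤ c * b := Nat.mul_le_mul_left c (Nat.succ_le_of_lt hj)
    have h2 : c * (j + 1) = c * j + c := by ring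
    have h3 : b * c = c * b := by ring
    omega
  have e1 : (b * c * q + (c * j + i)) / (b * c) = q := by
    rw [Nat.mul_add_div (by omega), Nat.div_eq_of_lt hbc]; omega
  have e2 : (b * c * q + (c * j + i)) % (b * c) = c * j + i := by
    rw [Nat.mul_add_mod, Nat.mod_eq_of_lt hbc]
  have e3 : (c * j + i) / c = j := by
    rw [Nat.mul_add_div (by omega), Nat.div_eq_of_lt hi]; omega
  have e4 : (c * j + i) % c = i := by
    rw [Nat.mul_add_mod, Nat.mod_eq_of_lt hi]
  refine ⟨?_, ?_, ?_, ?_⟩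
  · rw [show (b : Int) * c = ((b * c : Nat) : Int) by push_cast; ring,
        PySem.Int.floordiv_natCast, e1]
  · rw [show (b : Int) * c = ((b * c : Nat) : Int) by push_cast; ring,
        PySem.Int.mod_natCast, e2]
  · rw [PySem.Int.floordiv_natCast, e3]
  · rw [PySem.Int.mod_natCast, e4]

-- ===== VERDICT (by name: the statement is the Claim_ definition above) =====
theorem get_cen_spec : Claim_equal_get_cen := by
  intro shape rx ry rz margin re_filed _ _
  unfold Spec_get_cen get_cen get_cen_alt
  simp only [PySem.List.foldl_append_singleton_eq_map, PySem.List.foldl_append_eq_flatMap,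
    List.nil_append]
  -- name the axis counts and pass to Nat
  set dx := rx - re_filed
  set dy := ry - re_filed
  set dz := rz - re_filed
  set x1 := PySem.Int.floordiv shape.1 dx with hx1
  set y1 := PySem.Int.floordiv shape.2.1 dy with hy1
  set z1 := PySem.Int.floordiv shape.2.2 dz + 1 with hz1
  have hnx : max x1 0 = ((x1.toNat : Nat) : Int) := (Int.toNat_eq_max x1).symm
  have hny : max y1 0 = ((y1.toNat : Nat) : Int) := (Int.toNat_eq_max y1).symm
  have hnz : max z1 0 = ((z1.toNat : Nat) : Int) := (Int.toNat_eq_max z1).symm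
  rw [hnx, hny, hnz]
  -- rewrite all four pyRanges into Nat ranges
  have hr : ∀ m : Int, PySem.List.pyRange 0 m 1 = List.map (fun n : Nat => (n : Int)) (List.range m.toNat) := by
    intro m
    rw [PySem.List.pyRange_one]
    simp only [Int.sub_zero, zero_add]
  rw [show ((z1.toNat : Int) * (y1.toNat : Int) * (x1.toNat : Int))
        = ((z1.toNat * (y1.toNat * x1.toNat) : Nat) : Int) by push_cast; ring]
  rw [hr x1, hr y1, hr z1, hr ((z1.toNat * (y1.toNat * x1.toNat) : Nat) : Int)]
  rw [Int.toNat_natCast]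
  simp only [List.flatMap_map, List.map_map, Function.comp_def]
  rw [pv_key z1.toNat y1.toNat x1.toNat _
      (fun q j i => [Int.tdiv (dx * (2 * (i : Int) + 1)) 2,
                     Int.tdiv (dy * (2 * (j : Int) + 1)) 2,
                     Int.tdiv (dz * (2 * (q : Int) + 1)) 2])
      (fun q j i hj hi => by
        obtain ⟨e1, e2, e3, e4⟩ := pv_div_eval y1.toNat x1.toNat q j i hj hi
        push_cast only []
        simp only [e1, e2, e3, e4])]
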